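-- pv_equiv track=rewrite | github.com/AmalVR/MediVerse | scripts/extract-z-anatomy-ontology.py | determine_system
-- ===== SOURCE A (Python) =====
-- def determine_system(collection_name, object_name):
--     """Determine anatomical system from collection/object name"""
--     name_lower = f"{collection_name} {object_name}".lower()
--
--     if any(kw in name_lower for kw in ['skeleton', 'bone', 'skull', 'vertebra', 'rib', 'femur']):
--         return 'SKELETAL'
--     elif any(kw in name_lower for kw in ['muscle', 'muscular']):
--         return 'MUSCULAR'
--     elif any(kw in name_lower for kw in ['nerve', 'nervous', 'brain', 'spinal']):
--         return 'NERVOUS'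
--     elif any(kw in name_lower for kw in ['heart', 'cardiac', 'artery', 'vein', 'blood']):
--         return 'CARDIOVASCULAR'
--     elif any(kw in name_lower for kw in ['lung', 'respiratory', 'trachea', 'bronch']):
--         return 'RESPIRATORY'
--     elif any(kw in name_lower for kw in ['stomach', 'intestin', 'digestive', 'liver', 'pancrea']):
--         return 'DIGESTIVE'
--     elif any(kw in name_lower for kw in ['kidney', 'bladder', 'urinary', 'ureter']):
--         return 'URINARY'
--     elif any(kw in name_lower for kw in ['lymph', 'spleen', 'thymus']):
--         return 'LYMPHATIC'
--     elif any(kw in name_lower for kw in ['skin', 'integument', 'hair']):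
--         return 'INTEGUMENTARY'
--     else:
--         return 'SKELETAL'  # Default
-- ===== SOURCE B (Python) =====
-- SYSTEMS = ['SKELETAL', 'MUSCULAR', 'NERVOUS', 'CARDIOVASCULAR', 'RESPIRATORY',
--            'DIGESTIVE', 'URINARY', 'LYMPHATIC', 'INTEGUMENTARY']
--
-- KEYWORD_PRIORITY = {
--     'skeleton': 0, 'bone': 0, 'skull': 0, 'vertebra': 0, 'rib': 0, 'femur': 0,
--     'muscle': 1, 'muscular': 1,
--     'nerve': 2, 'nervous': 2, 'brain': 2, 'spinal': 2,
--     'heart': 3, 'cardiac': 3, 'artery': 3, 'vein': 3, 'blood': 3,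
--     'lung': 4, 'respiratory': 4, 'trachea': 4, 'bronch': 4,
--     'stomach': 5, 'intestin': 5, 'digestive': 5, 'liver': 5, 'pancrea': 5,
--     'kidney': 6, 'bladder': 6, 'urinary': 6, 'ureter': 6,
--     'lymph': 7, 'spleen': 7, 'thymus': 7,
--     'skin': 8, 'integument': 8, 'hair': 8,
-- }
--
-- def determine_system(collection_name, object_name):
--     """Determine anatomical system from collection/object name"""
--     name_lower = f"{collection_name} {object_name}".lower()
--     best = min((p for kw, p in KEYWORD_PRIORITY.items() if kw in name_lower), default=0)
--     return SYSTEMS[best]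
-- ===== Notes on version B (the rewrite author's own statement) =====
-- stated objective: alternative
-- what changed: Replaced the nine-branch first-match if/elif chain by a flat keyword->priority dict: B scans all keywords once, takes the minimum priority among matching keywords (default 0) and indexes an ordered SYSTEMS table; equivalent because priorities are nondecreasing in scan order, so the minimum equals the first-group match.
import Mathlib
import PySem

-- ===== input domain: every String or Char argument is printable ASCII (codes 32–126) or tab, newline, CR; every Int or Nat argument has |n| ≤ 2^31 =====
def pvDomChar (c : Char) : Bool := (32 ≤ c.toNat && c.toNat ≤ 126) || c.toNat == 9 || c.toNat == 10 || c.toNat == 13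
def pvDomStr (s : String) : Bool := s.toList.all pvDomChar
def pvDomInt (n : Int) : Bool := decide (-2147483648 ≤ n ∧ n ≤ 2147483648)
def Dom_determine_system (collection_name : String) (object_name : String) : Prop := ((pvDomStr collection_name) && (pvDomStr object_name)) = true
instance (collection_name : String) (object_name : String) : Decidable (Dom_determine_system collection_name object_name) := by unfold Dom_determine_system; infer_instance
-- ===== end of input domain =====

-- B replaces A's nine-branch if/elif chain with a flat keyword→priority map: it takes the
-- minimum priority among ALL matching keywords (default 0) and indexes a system-name table
-- (alternative decomposition, same cost).

-- ===== PORT A =====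
def determine_system (collection_name : String) (object_name : String) : String :=
  let name_lower := PySem.Str.lower (collection_name ++ " " ++ object_name)
  if ["skeleton", "bone", "skull", "vertebra", "rib", "femur"].any (fun kw => PySem.Str.isIn kw name_lower) then "SKELETAL"
  else if ["muscle", "muscular"].any (fun kw => PySem.Str.isIn kw name_lower) then "MUSCULAR"
  else if ["nerve", "nervous", "brain", "spinal"].any (fun kw => PySem.Str.isIn kw name_lower) then "NERVOUS"
  else if ["heart", "cardiac", "artery", "vein", "blood"].any (fun kw => PySem.Str.isIn kw name_lower) then "CARDIOVASCULAR"
  else if ["lung", "respiratory", "trachea", "bronch"].any (fun kw => PySem.Str.isIn kw name_lower) then "RESPIRATORY"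
  else if ["stomach", "intestin", "digestive", "liver", "pancrea"].any (fun kw => PySem.Str.isIn kw name_lower) then "DIGESTIVE"
  else if ["kidney", "bladder", "urinary", "ureter"].any (fun kw => PySem.Str.isIn kw name_lower) then "URINARY"
  else if ["lymph", "spleen", "thymus"].any (fun kw => PySem.Str.isIn kw name_lower) then "LYMPHATIC"
  else if ["skin", "integument", "hair"].any (fun kw => PySem.Str.isIn kw name_lower) then "INTEGUMENTARY"
  else "SKELETAL"

-- ===== PORT B =====
-- SYSTEMS table of Source B
def dsSystems : List String :=
  ["SKELETAL", "MUSCULAR", "NERVOUS", "CARDIOVASCULAR", "RESPIRATORY",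
   "DIGESTIVE", "URINARY", "LYMPHATIC", "INTEGUMENTARY"]

-- KEYWORD_PRIORITY dict of Source B as an association list in insertion order
def dsKwPrio : List (String × Int) :=
  [("skeleton", 0), ("bone", 0), ("skull", 0), ("vertebra", 0), ("rib", 0), ("femur", 0),
   ("muscle", 1), ("muscular", 1),
   ("nerve", 2), ("nervous", 2), ("brain", 2), ("spinal", 2),
   ("heart", 3), ("cardiac", 3), ("artery", 3), ("vein", 3), ("blood", 3),
   ("lung", 4), ("respiratory", 4), ("trachea", 4), ("bronch", 4),
   ("stomach", 5), ("intestin", 5), ("digestive", 5), ("liver", 5), ("pancrea", 5),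
   ("kidney", 6), ("bladder", 6), ("urinary", 6), ("ureter", 6),
   ("lymph", 7), ("spleen", 7), ("thymus", 7),
   ("skin", 8), ("integument", 8), ("hair", 8)]

-- one step of Python's min() over the filtered generator (acc = min so far, none = empty so far)
def dsMinStep (s : String) (acc : Option Int) (x : String × Int) : Option Int :=
  if PySem.Str.isIn x.1 s then
    match acc with
    | none => some x.2
    | some m => some (min m x.2)
  else acc

def determine_system_alt (collection_name : String) (object_name : String) : String :=
  let name_lower := PySem.Str.lower (collection_name ++ " " ++ object_name)
  let best := (dsKwPrio.foldl (dsMinStep name_lower) none).getD 0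
  match PySem.List.pyGet? dsSystems best with
  | some r => r
  | none => ""   -- unreachable: best is always a valid index 0..8 (Python would raise IndexError)

-- ===== PRECONDITION & SPEC =====
def Spec_determine_system (collection_name : String) (object_name : String) (out : String) : Prop := out = determine_system_alt collection_name object_name
instance (collection_name : String) (object_name : String) (out : String) : Decidable (Spec_determine_system collection_name object_name out) := by unfold Spec_determine_system; infer_instance

-- ===== CLAIM =====
def Claim_equal_determine_system : Prop := ∀ (collection_name : String) (object_name : String), Dom_determine_system collection_name object_name → Spec_determine_system collection_name object_name (determine_system collection_name object_name)

-- ===== LEMMAS AND PROOFS =====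

-- once the running minimum m is ≤ every later priority, the fold keeps m
lemma dsMinStep_foldl_const (s : String) (m : Int) (l : List (String × Int))
    (h : ∀ x ∈ l, m ≤ x.2) : l.foldl (dsMinStep s) (some m) = some m := by
  induction l with
  | nil => rfl
  | cons x xs ih =>
      have hx : m ≤ x.2 := h x (List.mem_cons_self)
      have hstep : dsMinStep s (some m) x = some m := by
        unfold dsMinStep
        split_ifs
        · simp [min_eq_left hx]
        · rfl
      rw [List.foldl_cons, hstep]
      exact ih (fun y hy => h y (List.mem_cons_of_mem _ hy))

-- over a priority-nondecreasing list, the min-fold is the priority of the FIRST match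
lemma dsMinFold_eq_find (s : String) (l : List (String × Int))
    (h : l.Pairwise (fun a b => a.2 ≤ b.2)) :
    l.foldl (dsMinStep s) none = (l.find? (fun x => PySem.Str.isIn x.1 s)).map Prod.snd := by
  induction l with
  | nil => rfl
  | cons x xs ih =>
      rw [List.pairwise_cons] at h
      by_cases hx : PySem.Str.isIn x.1 s = true
      · have hstep : dsMinStep s none x = some x.2 := by
          unfold dsMinStep; rw [if_pos hx]
        rw [List.foldl_cons, hstep, dsMinStep_foldl_const s x.2 xs h.1,
            List.find?_cons_of_pos (a := x) (l := xs) (show (fun y : String × Int => PySem.Str.isIn y.1 s) x = true from hx)]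
        rfl
      · have hstep : dsMinStep s none x = none := by
          unfold dsMinStep; rw [if_neg hx]
        rw [List.foldl_cons, hstep, ih h.2,
            List.find?_cons_of_neg (a := x) (l := xs) (show ¬ (fun y : String × Int => PySem.Str.isIn y.1 s) x = true from hx)]

-- find? over a constant-priority group followed by the rest
lemma dsFind_group (kws : List String) (i : Int) (rest : List (String × Int)) (s : String) :
    (((kws.map (fun k => (k, i))) ++ rest).find? (fun x => PySem.Str.isIn x.1 s)).map Prod.snd
    = if kws.any (fun k => PySem.Str.isIn k s)
      then some i
      else (rest.find? (fun x => PySem.Str.isIn x.1 s)).map Prod.snd := by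
  induction kws with
  | nil => simp
  | cons k ks ih =>
      by_cases hk : PySem.Str.isIn k s = true
      · rw [List.map_cons, List.cons_append,
            List.find?_cons_of_pos (a := ((k, i) : String × Int)) (show (fun y : String × Int => PySem.Str.isIn y.1 s) (k, i) = true from hk)]
        have hk' : PySem.Chars.isIn k.toList s.toList = true := by simpa using hk
        simp [hk']
      · rw [List.map_cons, List.cons_append,
            List.find?_cons_of_neg (a := ((k, i) : String × Int)) (show ¬ (fun y : String × Int => PySem.Str.isIn y.1 s) (k, i) = true from hk), ih]
        have hk' : PySem.Chars.isIn k.toList s.toList = false := by simpa using hk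
        simp [hk']

-- ===== VERDICT =====
theorem determine_system_spec : Claim_equal_determine_system := by
  intro collection_name object_name _
  unfold Spec_determine_system determine_system determine_system_alt
  dsimp only
  generalize PySem.Str.lower (collection_name ++ " " ++ object_name) = s
  rw [dsMinFold_eq_find s dsKwPrio (by decide)]
  rw [show dsKwPrio
      = (["skeleton", "bone", "skull", "vertebra", "rib", "femur"].map (fun k => (k, (0 : Int))))
        ++ ((["muscle", "muscular"].map (fun k => (k, (1 : Int))))
        ++ ((["nerve", "nervous", "brain", "spinal"].map (fun k => (k, (2 : Int))))
        ++ ((["heart", "cardiac", "artery", "vein", "blood"].map (fun k => (k, (3 : Int))))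
        ++ ((["lung", "respiratory", "trachea", "bronch"].map (fun k => (k, (4 : Int))))
        ++ ((["stomach", "intestin", "digestive", "liver", "pancrea"].map (fun k => (k, (5 : Int))))
        ++ ((["kidney", "bladder", "urinary", "ureter"].map (fun k => (k, (6 : Int))))
        ++ ((["lymph", "spleen", "thymus"].map (fun k => (k, (7 : Int))))
        ++ ((["skin", "integument", "hair"].map (fun k => (k, (8 : Int)))) ++ []))))))))
      from rfl]
  rw [dsFind_group, dsFind_group, dsFind_group, dsFind_group, dsFind_group,
      dsFind_group, dsFind_group, dsFind_group, dsFind_group]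
  split_ifs <;> rfl
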